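-- pv_equiv track=rewrite | github.com/michaelmross/tasktracker | spike_certify_mp.py | count_twos_from_runs
-- ===== SOURCE A (Python) =====
-- def count_twos_from_runs(start_bit: int, runs):
--     twos = 0
--     bit = start_bit
--     for Lr in runs:
--         if bit == 2:
--             twos += Lr
--         bit = 1 if bit == 2 else 2
--     return twos
-- ===== SOURCE B (Python) =====
-- def count_twos_from_runs(start_bit: int, runs):
--     runs = list(runs)
--     return sum(runs[0::2]) if start_bit == 2 else sum(runs[1::2])
-- ===== Notes on version B (the rewrite author's own statement) =====
-- stated objective: simpler
-- what changed: Replaces the per-element bit-toggling state machine with one parity decision on start_bit plus a single strided-slice sum over alternate elements.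
import Mathlib
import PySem

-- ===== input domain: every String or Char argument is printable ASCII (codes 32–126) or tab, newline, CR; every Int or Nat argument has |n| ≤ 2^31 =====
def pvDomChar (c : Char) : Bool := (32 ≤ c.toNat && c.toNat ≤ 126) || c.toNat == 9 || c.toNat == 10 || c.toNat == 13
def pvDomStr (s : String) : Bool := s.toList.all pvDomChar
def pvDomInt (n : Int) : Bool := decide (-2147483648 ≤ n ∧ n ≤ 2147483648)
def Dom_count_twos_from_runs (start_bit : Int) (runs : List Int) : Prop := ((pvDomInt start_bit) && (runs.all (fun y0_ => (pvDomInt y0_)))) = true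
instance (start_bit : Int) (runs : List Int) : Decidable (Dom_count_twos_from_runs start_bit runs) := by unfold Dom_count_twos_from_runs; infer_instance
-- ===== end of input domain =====

-- ===== PORT A =====
def count_twos_from_runs (start_bit : Int) (runs : List Int) : Int :=
  (runs.foldl
    (fun (s : Int × Int) Lr =>
      (if s.2 == 2 then s.1 + Lr else s.1, if s.2 == 2 then 1 else 2))
    (0, start_bit)).1

-- ===== PORT B =====
-- runs[0::2] : every second element starting at index 0
def pvEveryOther : List Int → List Int
  | [] => []
  | [x] => [x]
  | x :: _ :: rest => x :: pvEveryOther rest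

-- One honest line: B replaces A's bit-toggling loop with a parity decision plus a strided-slice sum (objective: simpler).
def count_twos_from_runs_alt (start_bit : Int) (runs : List Int) : Int :=
  if start_bit == 2 then (pvEveryOther runs).sum else (pvEveryOther (runs.drop 1)).sum

-- ===== PRECONDITION & SPEC =====
def Spec_count_twos_from_runs (start_bit : Int) (runs : List Int) (out : Int) : Prop := out = count_twos_from_runs_alt start_bit runs
instance (start_bit : Int) (runs : List Int) (out : Int) : Decidable (Spec_count_twos_from_runs start_bit runs out) := by unfold Spec_count_twos_from_runs; infer_instance

-- ===== CLAIM (what is proved, stated in full; the proofs are below) =====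
def Claim_equal_count_twos_from_runs : Prop := ∀ (start_bit : Int) (runs : List Int), Dom_count_twos_from_runs start_bit runs → Spec_count_twos_from_runs start_bit runs (count_twos_from_runs start_bit runs)

-- ===== LEMMAS AND PROOFS =====

-- ===== VERDICT (by name: the statement is the Claim_ definition above) =====
lemma loop_char (runs : List Int) : ∀ (twos bit : Int),
    (runs.foldl
      (fun (s : Int × Int) Lr =>
        (if s.2 == 2 then s.1 + Lr else s.1, if s.2 == 2 then 1 else 2))
      (twos, bit)).1
    = twos + (if bit == 2 then (pvEveryOther runs).sum else (pvEveryOther (runs.drop 1)).sum) := by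
  induction runs with
  | nil => intro twos bit; simp [pvEveryOther]
  | cons x rest ih =>
    intro twos bit
    by_cases h : bit = 2
    · subst h
      simp only [List.foldl_cons, beq_self_eq_true, ih]
      cases rest with
      | nil => simp [pvEveryOther]
      | cons y r => simp [pvEveryOther]; ring
    · have hb : (bit == 2) = false := by simpa using h
      simp only [List.foldl_cons, hb, Bool.false_eq_true, ite_false, ih]
      simp

theorem count_twos_from_runs_spec : Claim_equal_count_twos_from_runs := by
  intro start_bit runs _
  unfold Spec_count_twos_from_runs count_twos_from_runs count_twos_from_runs_alt
  rw [loop_char]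
  split <;> simp
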